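-- pv_equiv track=rewrite | github.com/mtaimoor1407/secure-qr-playfair | playfair.py | clean_decrypted
-- ===== SOURCE A (Python) =====
-- def clean_decrypted(text):
--     # Remove trailing X padding
--     if text.endswith("X"):
--         text = text[:-1]
--     # Remove X inserted between duplicate letters
--     result = ""
--     i = 0
--     while i < len(text):
--         if (text[i] == "X" and
--                 i > 0 and
--                 i < len(text) - 1 and
--                 text[i - 1] == text[i + 1]):
--             i += 1
--             continue
--         result += text[i]
--         i += 1
--     return result
-- ===== SOURCE B (Python) =====
-- def clean_decrypted(text):
--     # Remove trailing X padding
--     if text.endswith("X"):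
--         text = text[:-1]
--     # Run-length view of the 'X' runs: a run of k >= 2 X's keeps exactly its two
--     # boundary X's (only the interior X's are flanked by equal characters, namely
--     # 'X' itself); a lone X survives unless its two flanking characters are equal.
--     out = []
--     n = len(text)
--     i = 0
--     while i < n:
--         if text[i] != "X":
--             out.append(text[i])
--             i += 1
--             continue
--         j = i
--         while j < n and text[j] == "X":
--             j += 1
--         if j - i >= 2:
--             out.append("XX")
--         elif not (0 < i and j < n and text[i - 1] == text[j]):
--             out.append("X")
--         i = j
--     return "".join(out)
-- ===== Notes on version B (the rewrite author's own statement) =====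
-- stated objective: faster
-- what changed: Replaced the per-character neighbour test with a run-length pass over the maximal 'X' runs: a run of k>=2 X's contributes exactly its two boundary X's and a lone X survives unless its flanking characters are equal, so the result is assembled run by run and joined once instead of grown by repeated string concatenation.
import Mathlib
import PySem

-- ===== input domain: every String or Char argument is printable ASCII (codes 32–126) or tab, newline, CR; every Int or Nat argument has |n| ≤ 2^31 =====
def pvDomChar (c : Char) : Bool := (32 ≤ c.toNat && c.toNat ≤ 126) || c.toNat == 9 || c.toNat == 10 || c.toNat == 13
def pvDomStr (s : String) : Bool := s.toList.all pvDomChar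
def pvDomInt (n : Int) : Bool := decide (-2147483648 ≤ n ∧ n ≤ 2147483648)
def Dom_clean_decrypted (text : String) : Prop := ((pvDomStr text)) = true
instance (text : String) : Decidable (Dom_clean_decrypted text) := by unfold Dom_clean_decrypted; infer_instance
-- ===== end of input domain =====

-- B replaces A's per-character neighbour test by a run-length pass over the maximal
-- 'X' runs (a run of k ≥ 2 X's keeps exactly its two boundary X's; a lone X survives
-- unless its flanking characters are equal).

-- ===== PORT A =====
-- the while loop: i scans the (possibly stripped) text, skipping an 'X' strictly
-- between two equal characters of the original text
def pvALoop (t : List Char) (i : Nat) : List Char :=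
  if h : i < t.length then
    if t[i]! = 'X' ∧ 0 < i ∧ i < t.length - 1 ∧ t[i - 1]! = t[i + 1]! then
      pvALoop t (i + 1)
    else
      t[i]! :: pvALoop t (i + 1)
  else []
termination_by t.length - i

def clean_decrypted (text : String) : String :=
  let t := if PySem.Str.endswith text "X" then PySem.Str.slice text none (some (-1)) else text
  String.ofList (pvALoop t.toList 0)

-- ===== PORT B =====
-- port of Source B's outer while loop; `p` is the character just before the rest of the
-- text (text[i-1], none at the start); the inner `while j` scan is takeWhile/dropWhile
def pvBLoop (p : Option Char) : List Char → List Char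
  | [] => []
  | c :: cs =>
    if c ≠ 'X' then c :: pvBLoop (some c) cs
    else if 1 + (cs.takeWhile (· = 'X')).length ≥ 2 then
      'X' :: 'X' :: pvBLoop (some 'X') (cs.dropWhile (· = 'X'))
    else if p.isSome ∧ p = (cs.dropWhile (· = 'X')).head? then
      pvBLoop (some 'X') (cs.dropWhile (· = 'X'))
    else 'X' :: pvBLoop (some 'X') (cs.dropWhile (· = 'X'))
  termination_by l => l.length
  decreasing_by all_goals
    (simp only [List.length_cons]
     first
     | omega
     | exact Nat.lt_succ_of_le (List.length_dropWhile_le _ _))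

def clean_decrypted_alt (text : String) : String :=
  let t := if PySem.Str.endswith text "X" then PySem.Str.slice text none (some (-1)) else text
  String.ofList (pvBLoop none t.toList)

-- ===== PRECONDITION & SPEC =====
def Spec_clean_decrypted (text : String) (out : String) : Prop := out = clean_decrypted_alt text
instance (text : String) (out : String) : Decidable (Spec_clean_decrypted text out) := by unfold Spec_clean_decrypted; infer_instance

-- ===== CLAIM (what is proved, stated in full; the proofs are below) =====
def Claim_equal_clean_decrypted : Prop := ∀ (text : String), Dom_clean_decrypted text → Spec_clean_decrypted text (clean_decrypted text)

-- ===== LEMMAS AND PROOFS =====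

-- one-pass characterisation of A's loop: drop each 'X' whose previous character
-- equals the next character (proof intermediary between the two ports)
def pvBFilter : Option Char → List Char → List Char
  | _, [] => []
  | p, c :: rest =>
    if c = 'X' ∧ p.isSome ∧ p = rest.head? then pvBFilter (some c) rest
    else c :: pvBFilter (some c) rest

lemma pvLoop_eq (t : List Char) (i : Nat) (hle : i ≤ t.length) :
    pvALoop t i = pvBFilter (if i = 0 then none else t[i - 1]?) (t.drop i) := by
  rcases Nat.lt_or_ge i t.length with hlt | hge
  · have hdrop : t.drop i = t[i] :: t.drop (i + 1) := List.drop_eq_getElem_cons hlt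
    have hIH : pvALoop t (i + 1) = pvBFilter (some t[i]) (t.drop (i + 1)) := by
      have := pvLoop_eq t (i + 1) hlt
      simpa [List.getElem?_eq_getElem hlt] using this
    have hgi : t[i]! = t[i] := getElem!_pos t i hlt
    have hhead : (t.drop (i + 1)).head? = t[i + 1]? := by
      simp [List.head?_drop]
    have hiff : (t[i] = 'X' ∧ 0 < i ∧ i < t.length - 1 ∧ t[i - 1]! = t[i + 1]!) ↔
        (t[i] = 'X' ∧ (if i = 0 then (none : Option Char) else t[i - 1]?).isSome = true ∧
          (if i = 0 then (none : Option Char) else t[i - 1]?) = (t.drop (i + 1)).head?) := by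
      rw [hhead]
      constructor
      · rintro ⟨hx, hi0, hib, heq⟩
        have h1 : i - 1 < t.length := by omega
        have h2 : i + 1 < t.length := by omega
        have hne : i ≠ 0 := by omega
        refine ⟨hx, ?_, ?_⟩
        · simp [hne, List.getElem?_eq_getElem h1]
        · rw [if_neg hne, List.getElem?_eq_getElem h1, List.getElem?_eq_getElem h2]
          rw [getElem!_pos t (i - 1) h1, getElem!_pos t (i + 1) h2] at heq
          exact congrArg some heq
      · rintro ⟨hx, hs, heq⟩
        have hne : i ≠ 0 := by intro h; subst h; simp at hs
        rw [if_neg hne] at heq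
        have h1 : i - 1 < t.length := by omega
        rw [List.getElem?_eq_getElem h1] at heq
        have h2 : i + 1 < t.length := by
          by_contra hc
          rw [List.getElem?_eq_none (by omega)] at heq
          simp at heq
        rw [List.getElem?_eq_getElem h2] at heq
        refine ⟨hx, by omega, by omega, ?_⟩
        rw [getElem!_pos t (i - 1) h1, getElem!_pos t (i + 1) h2]
        exact Option.some.inj heq
    rw [pvALoop, dif_pos hlt, hdrop, pvBFilter.eq_def]
    simp only [hIH, hgi]
    exact if_congr hiff rfl rfl
  · have hi : i = t.length := le_antisymm hle hge
    rw [pvALoop, dif_neg (by omega)]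
    rw [List.drop_of_length_le (by omega)]
    cases (if i = 0 then (none : Option Char) else t[i - 1]?) <;> rfl
termination_by t.length - i

-- pvBFilter on a run of X's followed by a non-X remainder keeps exactly the last X
lemma pvBFilter_run (m : Nat) (r : List Char) (hr : r.head? ≠ some 'X') :
    pvBFilter (some 'X') (List.replicate m 'X' ++ r) =
      if m = 0 then pvBFilter (some 'X') r else 'X' :: pvBFilter (some 'X') r := by
  induction m with
  | zero => simp
  | succ m ih =>
    rw [List.replicate_succ, List.cons_append]
    simp only [pvBFilter]
    cases m with
    | zero =>
      rw [if_neg (fun hcon => hr hcon.2.2.symm)]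
      simp
    | succ m' =>
      rw [if_pos ⟨by trivial, by trivial, by simp [List.replicate_succ]⟩]
      rw [ih]
      simp

lemma pvB_eq_filter (l : List Char) (p : Option Char)
    (h : ¬(p = some 'X' ∧ l.head? = some 'X')) :
    pvBLoop p l = pvBFilter p l := by
  match l with
  | [] => simp [pvBLoop, pvBFilter]
  | c :: cs =>
    by_cases hc : c = 'X'
    · subst hc
      have hpX : p ≠ some 'X' := fun hp => h ⟨hp, rfl⟩
      have hrep : cs.takeWhile (· = 'X') =
          List.replicate (cs.takeWhile (· = 'X')).length 'X' := by
        apply List.eq_replicate_of_mem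
        intro b hb
        simpa using List.mem_takeWhile_imp hb
      have hrest : (cs.dropWhile (· = 'X')).head? ≠ some 'X' := by
        intro hh
        have := List.head?_dropWhile_not (· = 'X') cs
        rw [hh] at this
        simp at this
      have hIH : pvBLoop (some 'X') (cs.dropWhile (· = 'X')) =
          pvBFilter (some 'X') (cs.dropWhile (· = 'X')) := by
        apply pvB_eq_filter
        rintro ⟨-, hh⟩
        exact hrest hh
      rw [pvBLoop, if_neg (by simp)]
      by_cases hm0 : (cs.takeWhile (· = 'X')).length = 0
      · -- lone X: the run is empty and the remainder is cs itself
        have hcs : cs.dropWhile (· = 'X') = cs := by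
          conv_rhs => rw [← List.takeWhile_append_dropWhile (p := (· = 'X')) (l := cs)]
          rw [List.length_eq_zero_iff.mp hm0]
          simp
        rw [if_neg (by omega)]
        rw [hcs] at hIH ⊢
        simp only [pvBFilter]
        by_cases hcond : p.isSome ∧ p = cs.head?
        · rw [if_pos hcond, if_pos ⟨by trivial, hcond.1, hcond.2⟩, hIH]
        · rw [if_neg hcond, if_neg (by rintro ⟨-, h2, h3⟩; exact hcond ⟨h2, h3⟩), hIH]
      · -- run of length ≥ 1: A keeps exactly the first and last X of the run
        have hcs2 : cs = List.replicate (cs.takeWhile (· = 'X')).length 'X' ++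
            cs.dropWhile (· = 'X') := by
          conv_lhs => rw [← List.takeWhile_append_dropWhile (p := (· = 'X')) (l := cs)]
          rw [← hrep]
        have hcshead : cs.head? = some 'X' := by
          rw [hcs2]
          cases hlen : (cs.takeWhile (· = 'X')).length with
          | zero => omega
          | succ k => simp [List.replicate_succ]
        rw [if_pos (by omega)]
        simp only [pvBFilter]
        rw [if_neg (by rintro ⟨-, -, h3⟩; exact hpX (h3.trans hcshead))]
        conv_rhs => rw [hcs2]
        rw [pvBFilter_run _ _ hrest, if_neg hm0, hIH]
    · rw [pvBLoop, if_pos hc]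
      simp only [pvBFilter]
      rw [if_neg (by rintro ⟨h1, -⟩; exact hc h1)]
      have : pvBLoop (some c) cs = pvBFilter (some c) cs := by
        apply pvB_eq_filter
        rintro ⟨h1, -⟩
        exact hc (Option.some.inj h1)
      rw [this]
termination_by l.length
decreasing_by all_goals
  (simp only [List.length_cons]
   first
   | omega
   | exact Nat.lt_succ_of_le (List.length_dropWhile_le _ _))

-- ===== VERDICT (by name: the statement is the Claim_ definition above) =====
theorem clean_decrypted_spec : Claim_equal_clean_decrypted := by
  intro text _
  unfold Spec_clean_decrypted clean_decrypted clean_decrypted_alt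
  simp only
  rw [pvLoop_eq _ 0 (Nat.zero_le _), pvB_eq_filter _ _ (by simp)]
  simp
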